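-- pv_equiv track=rewrite | github.com/deborah-powers/python-modules | fileJs - Copie.py | maskBracketInString
-- ===== SOURCE A (Python) =====
-- def maskBracketInString (text, quote):
-- 	croches =( '{~', '}^')
-- 	if text.count (quote) %2 ==0:
-- 		textList = text.split (quote)
-- 		rangeList = range (1, len (textList), 2)
-- 		for l in rangeList:
-- 			for b,a in croches: textList[l] = textList[l].replace (b, a)
-- 		text = quote.join (textList)
-- 	else: print ('nombre inpaire de', quote)
-- 	return text
-- ===== SOURCE B (Python) =====
-- def maskBracketInString(text, quote):
-- 	if text.count(quote) % 2 != 0: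
-- 		print('nombre inpaire de', quote)
-- 		return text
-- 	mask = {'{': '~', '}': '^'}
-- 	out = []
-- 	inside = False
-- 	i = 0
-- 	n = len(text)
-- 	q = len(quote)
-- 	while i < n:
-- 		if quote and text.startswith(quote, i):
-- 			inside = not inside
-- 			out.append(quote)
-- 			i += q
-- 		else:
-- 			c = text[i]
-- 			out.append(mask[c] if inside and c in mask else c)
-- 			i += 1
-- 	return ''.join(out)
-- ===== Notes on version B (the rewrite author's own statement) =====
-- stated objective: alternative
-- what changed: Replaces A's split-into-segments / replace-in-odd-segments / join pipeline by a single left-to-right scan that flips an `inside` flag at each non-overlapping occurrence of quote and maps '{'/'}' to '~'/'^' only while inside.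
-- crash fix: On quote = '' with text of odd length, text.count('') is even so A calls text.split('') which raises ValueError; B returns text unchanged (its scan never matches an empty quote). — e.g. on maskBracketInString("{x}", ""): A raises ValueError, B returns "{x}"
import Mathlib
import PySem

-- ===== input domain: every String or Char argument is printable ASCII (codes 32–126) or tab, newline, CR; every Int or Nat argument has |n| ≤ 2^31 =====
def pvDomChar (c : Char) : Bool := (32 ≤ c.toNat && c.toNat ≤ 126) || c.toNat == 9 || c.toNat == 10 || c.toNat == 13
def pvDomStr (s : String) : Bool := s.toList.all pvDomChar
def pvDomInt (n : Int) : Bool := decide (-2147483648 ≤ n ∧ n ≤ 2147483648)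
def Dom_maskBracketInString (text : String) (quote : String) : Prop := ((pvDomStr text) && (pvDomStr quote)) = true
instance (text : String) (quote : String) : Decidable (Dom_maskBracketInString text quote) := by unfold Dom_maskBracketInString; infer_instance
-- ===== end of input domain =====

-- B replaces A's split / per-segment replace / join pipeline by a single left-to-right scan
-- that flips an `inside` flag at each quote occurrence (objective: alternative decomposition,
-- same asymptotic cost).

-- ===== PORT A =====
-- textList[l] = textList[l].replace('{','~'); textList[l] = textList[l].replace('}','^')
-- (the inner 'for b,a in croches' loop over the 2-element tuple, unrolled)
def pvRepA (s : String) : String :=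
  PySem.Str.replace (PySem.Str.replace s "{" "~") "}" "^"

def maskBracketInString (text : String) (quote : String) : String :=
  if PySem.Str.count text quote % 2 == 0 then
    match PySem.Str.split? text quote with
    | none => text   -- ValueError from text.split('') — these inputs are excluded by Pre_
    | some textList =>
      let textList :=
        (PySem.List.pyRange 1 (textList.length : Int) 2).foldl
          (fun tl l => PySem.List.pySetD tl l (pvRepA (PySem.List.pyGetD tl l ""))) textList
      PySem.Str.join quote textList
  else text

-- ===== PORT B =====
-- mask[c] if inside and c in mask else c
def pvMaskCharB (inside : Bool) (c : Char) : Char :=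
  if inside then (if c = '{' then '~' else if c = '}' then '^' else c) else c

-- the while loop of Source B: fuel = remaining iterations bound (each step consumes ≥ 1 char)
def pvScanB (q : List Char) : Nat → List Char → Bool → List Char → List Char
  | 0, l, _, acc => acc.reverse ++ l
  | _ + 1, [], _, acc => acc.reverse
  | fuel + 1, c :: rest, inside, acc =>
    if !q.isEmpty && q.isPrefixOf (c :: rest) then
      pvScanB q fuel (List.drop q.length (c :: rest)) (!inside) (q.reverse ++ acc)
    else
      pvScanB q fuel rest inside (pvMaskCharB inside c :: acc)

def maskBracketInString_alt (text : String) (quote : String) : String :=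
  if PySem.Str.count text quote % 2 != 0 then text
  else String.ofList (pvScanB quote.toList (text.toList.length + 1) text.toList false [])

-- ===== PRECONDITION & SPEC =====
-- Pre_ excludes exactly the inputs on which A raises: quote = '' with text of odd length,
-- where text.split('') raises ValueError (A returns on every other input).
def Pre_maskBracketInString (text : String) (quote : String) : Prop :=
  ¬ (quote = "" ∧ text.toList.length % 2 = 1)
instance (text : String) (quote : String) : Decidable (Pre_maskBracketInString text quote) := by
  unfold Pre_maskBracketInString; infer_instance

def pvWitness_maskBracketInString : String × String := ("say {hi} \"to {all}\" now", "\"")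

-- On quote = '' with text of odd length A raises ValueError (text.split('')); B returns text unchanged.
def Raises_maskBracketInString (text : String) (quote : String) : Prop :=
  quote = "" ∧ text.toList.length % 2 = 1
instance (text : String) (quote : String) : Decidable (Raises_maskBracketInString text quote) := by
  unfold Raises_maskBracketInString; infer_instance

def pvRaiseWitness_maskBracketInString : String × String := ("{x}", "")
def pvRaiseWitnessOut_maskBracketInString : String := "{x}"

def Spec_maskBracketInString (text : String) (quote : String) (out : String) : Prop := out = maskBracketInString_alt text quote
instance (text : String) (quote : String) (out : String) : Decidable (Spec_maskBracketInString text quote out) := by unfold Spec_maskBracketInString; infer_instance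

-- ===== CLAIM (what is proved, stated in full; the proofs are below) =====
def Claim_equal_maskBracketInString : Prop := ∀ (text : String) (quote : String), Dom_maskBracketInString text quote → Pre_maskBracketInString text quote → Spec_maskBracketInString text quote (maskBracketInString text quote)

def Claim_raises_maskBracketInString : Prop := (∀ (text : String) (quote : String), Dom_maskBracketInString text quote → Raises_maskBracketInString text quote → ¬ Pre_maskBracketInString text quote) ∧ (Dom_maskBracketInString (pvRaiseWitness_maskBracketInString.1) (pvRaiseWitness_maskBracketInString.2) ∧ Raises_maskBracketInString (pvRaiseWitness_maskBracketInString.1) (pvRaiseWitness_maskBracketInString.2) ∧ maskBracketInString_alt (pvRaiseWitness_maskBracketInString.1) (pvRaiseWitness_maskBracketInString.2) = pvRaiseWitnessOut_maskBracketInString)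

-- ===== LEMMAS AND PROOFS =====

-- the single character substitution both replaces amount to
def pvMaskC (c : Char) : Char :=
  if c = '{' then '~' else if c = '}' then '^' else c

-- clean fuelled segment decomposition of Chars.splitOn.go
def pvConsHead (pre : List Char) : List (List Char) → List (List Char)
  | [] => [pre]
  | s :: ss => (pre ++ s) :: ss

def pvSegs (q : List Char) : Nat → List Char → List (List Char)
  | 0, l => [l]
  | _ + 1, [] => [[]]
  | fuel + 1, c :: rest =>
    if q.isPrefixOf (c :: rest) then [] :: pvSegs q fuel (List.drop q.length (c :: rest))
    else pvConsHead [c] (pvSegs q fuel rest)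

-- mask every other segment, starting with `inside`
def pvMaskSegs : Bool → List (List Char) → List (List Char)
  | _, [] => []
  | inside, s :: ss => (if inside then s.map pvMaskC else s) :: pvMaskSegs (!inside) ss

-- accumulator-free form of pvScanB
def pvMj (q : List Char) : Nat → List Char → Bool → List Char
  | 0, l, _ => l
  | _ + 1, [], _ => []
  | fuel + 1, c :: rest, inside =>
    if !q.isEmpty && q.isPrefixOf (c :: rest) then
      q ++ pvMj q fuel (List.drop q.length (c :: rest)) (!inside)
    else
      pvMaskCharB inside c :: pvMj q fuel rest inside

-- join with an explicit tail form
def pvTailJoin (q : List Char) : List (List Char) → List Char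
  | [] => []
  | s :: ss => q ++ s ++ pvTailJoin q ss

theorem pvIntercalate_cons (q x : List Char) (xs : List (List Char)) :
    List.intercalate q (x :: xs) = x ++ pvTailJoin q xs := by
  induction xs generalizing x with
  | nil => simp [List.intercalate, List.intersperse, pvTailJoin]
  | cons y ys ih =>
    simp only [List.intercalate, List.intersperse, List.flatten, pvTailJoin] at *
    simp [ih, List.append_assoc]

theorem pvSegs_ne_nil (q : List Char) (fuel : Nat) (l : List Char) : pvSegs q fuel l ≠ [] := by
  match fuel, l with
  | 0, l => simp [pvSegs]
  | _ + 1, [] => simp [pvSegs]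
  | fuel + 1, c :: rest =>
    simp only [pvSegs]
    split
    · simp
    · cases h : pvSegs q fuel rest with
      | nil => simp [pvConsHead]
      | cons s ss => simp [pvConsHead]

theorem pvSplitOn_go_eq (q : List Char) (fuel : Nat) (l cur : List Char) (acc : List (List Char)) :
    PySem.Chars.splitOn.go q fuel l cur acc
      = acc.reverse ++ pvConsHead cur.reverse (pvSegs q fuel l) := by
  induction fuel generalizing l cur acc with
  | zero => simp [PySem.Chars.splitOn.go, pvSegs, pvConsHead]
  | succ fuel ih =>
    cases l with
    | nil => simp [PySem.Chars.splitOn.go, pvSegs, pvConsHead]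
    | cons c rest =>
      rw [PySem.Chars.splitOn.go]
      by_cases hp : q.isPrefixOf (c :: rest) = true
      · rw [if_pos hp, ih]
        simp only [pvSegs, if_pos hp, pvConsHead]
        cases h : pvSegs q fuel (List.drop q.length (c :: rest)) with
        | nil => exact absurd h (pvSegs_ne_nil q fuel _)
        | cons s ss => simp
      · rw [if_neg hp, ih]
        simp only [pvSegs, if_neg hp]
        cases h : pvSegs q fuel rest with
        | nil => exact absurd h (pvSegs_ne_nil q fuel rest)
        | cons s ss => simp [pvConsHead]

theorem pvScanB_eq (q : List Char) (fuel : Nat) (l : List Char) (inside : Bool) (acc : List Char) :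
    pvScanB q fuel l inside acc = acc.reverse ++ pvMj q fuel l inside := by
  induction fuel generalizing l inside acc with
  | zero => simp [pvScanB, pvMj]
  | succ fuel ih =>
    cases l with
    | nil => simp [pvScanB, pvMj]
    | cons c rest =>
      rw [pvScanB, pvMj]
      split
      · rw [ih]; simp
      · rw [ih]; simp

theorem pvMj_eq_join (q : List Char) (hq : q ≠ []) :
    ∀ (fuel : Nat) (l : List Char) (inside : Bool), l.length < fuel →
    pvMj q fuel l inside = PySem.Chars.join q (pvMaskSegs inside (pvSegs q fuel l)) := by
  intro fuel
  induction fuel with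
  | zero => intro l inside h; omega
  | succ fuel ih =>
    intro l inside hl
    cases l with
    | nil =>
      simp [pvMj, pvMaskSegs, pvSegs, PySem.Chars.join, List.intercalate]
    | cons c rest =>
      have hqe : q.isEmpty = false := by cases q <;> simp_all
      rw [pvMj, pvSegs]
      by_cases hp : q.isPrefixOf (c :: rest) = true
      · rw [if_pos (by simp [hqe, hp]), if_pos hp]
        have hql : 1 ≤ q.length := by cases q <;> simp_all
        have hlen : (List.drop q.length (c :: rest)).length < fuel := by
          simp only [List.length_drop, List.length_cons] at *
          omega
        rw [ih _ _ hlen]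
        simp only [pvMaskSegs]
        have hne := pvSegs_ne_nil q fuel (List.drop q.length (c :: rest))
        cases h : pvSegs q fuel (List.drop q.length (c :: rest)) with
        | nil => exact absurd h hne
        | cons s ss =>
          simp only [h, pvMaskSegs] at *
          cases inside <;>
            simp [PySem.Chars.join, pvIntercalate_cons, pvTailJoin]
      · rw [if_neg (by simp [hqe, hp]), if_neg hp]
        have hlen : rest.length < fuel := by
          simp only [List.length_cons] at hl; omega
        rw [ih _ _ hlen]
        have hne := pvSegs_ne_nil q fuel rest
        cases h : pvSegs q fuel rest with
        | nil => exact absurd h hne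
        | cons s ss =>
          simp only [pvConsHead, pvMaskSegs]
          cases inside <;>
            simp [PySem.Chars.join, pvIntercalate_cons, pvMaskCharB, pvMaskC]

theorem pvReplace_single (b a : Char) (l : List Char) :
    PySem.Chars.replace l [b] [a] = l.map (fun c => if c = b then a else c) := by
  have go : ∀ (fuel : Nat) (l acc : List Char), l.length ≤ fuel →
      PySem.Chars.replace.go [b] [a] fuel l acc
        = acc.reverse ++ l.map (fun c => if c = b then a else c) := by
    intro fuel
    induction fuel with
    | zero => intro l acc h; cases l <;> simp_all [PySem.Chars.replace.go]
    | succ fuel ih =>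
      intro l acc h
      cases l with
      | nil => simp [PySem.Chars.replace.go]
      | cons c t =>
        rw [PySem.Chars.replace.go]
        by_cases hc : c = b
        · rw [if_pos (by simp [List.isPrefixOf, hc])]
          rw [ih _ _ (by simpa using Nat.le_of_succ_le_succ h)]
          simp [hc]
        · rw [if_neg (by simp [List.isPrefixOf]; exact fun hh => hc (hh.symm))]
          rw [ih _ _ (by simpa using Nat.le_of_succ_le_succ h)]
          simp [hc]
  simp only [PySem.Chars.replace, List.isEmpty_cons]
  rw [go l.length l [] (le_refl _)]
  simp

theorem pvRepA_toList (s : String) :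
    (pvRepA s).toList = s.toList.map pvMaskC := by
  have hmc : ∀ c : Char, (if (if c = '{' then '~' else c) = '}' then '^' else if c = '{' then '~' else c) = pvMaskC c := by
    intro c
    by_cases h1 : c = '{' <;> by_cases h2 : c = '}' <;> simp_all [pvMaskC]
  simp only [pvRepA, PySem.Str.toList_replace]
  have h1 : ("{" : String).toList = ['{'] := rfl
  have h2 : ("~" : String).toList = ['~'] := rfl
  have h3 : ("}" : String).toList = ['}'] := rfl
  have h4 : ("^" : String).toList = ['^'] := rfl
  rw [h1, h2, h3, h4, pvReplace_single, pvReplace_single, List.map_map]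
  exact List.map_congr_left (fun c _ => hmc c)

theorem pvMaskSegs_getElem? (b : Bool) (ss : List (List Char)) (i : Nat) :
    (pvMaskSegs b ss)[i]? = ss[i]?.map (fun s =>
      if (if b then i % 2 = 0 else i % 2 = 1) then s.map pvMaskC else s) := by
  induction ss generalizing b i with
  | nil => simp [pvMaskSegs]
  | cons s ss ih =>
    cases i with
    | zero => cases b <;> simp [pvMaskSegs]
    | succ i =>
      simp only [pvMaskSegs, List.getElem?_cons_succ, ih]
      cases b <;> {
        congr 1
        funext t
        congr 1
        simp [Nat.succ_mod_two_eq_zero_iff, Nat.succ_mod_two_eq_one_iff]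
      }

theorem pvFoldl_setOdd (parts : List String) :
    ((PySem.List.pyRange 1 (parts.length : Int) 2).foldl
        (fun tl l => PySem.List.pySetD tl l (pvRepA (PySem.List.pyGetD tl l ""))) parts).length
      = parts.length ∧
    ∀ i : Nat,
      ((PySem.List.pyRange 1 (parts.length : Int) 2).foldl
        (fun tl l => PySem.List.pySetD tl l (pvRepA (PySem.List.pyGetD tl l ""))) parts)[i]?
      = parts[i]?.map (fun s => if i % 2 = 1 then pvRepA s else s) := by
  have h2 : (0:Int) < 2 := by norm_num
  rw [PySem.List.pyRange_of_pos 1 (parts.length : Int) h2, List.foldl_map]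
  have inv : ∀ (m : Nat),
      (((List.range m).foldl (fun tl (k : Nat) =>
          PySem.List.pySetD tl (1 + 2*(k:Int)) (pvRepA (PySem.List.pyGetD tl (1 + 2*(k:Int)) ""))) parts).length
        = parts.length)
      ∧ ∀ i : Nat,
        (((List.range m).foldl (fun tl (k : Nat) =>
          PySem.List.pySetD tl (1 + 2*(k:Int)) (pvRepA (PySem.List.pyGetD tl (1 + 2*(k:Int)) ""))) parts))[i]?
        = if i % 2 = 1 ∧ i < 2*m then parts[i]?.map pvRepA else parts[i]? := by
    intro m
    induction m with
    | zero => simp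
    | succ m ih =>
      obtain ⟨ihlen, ihget⟩ := ih
      rw [List.range_succ, List.foldl_append, List.foldl_cons, List.foldl_nil]
      have hcast : (1 + 2*(m:Int)) = ((2*m+1 : Nat) : Int) := by push_cast; ring
      rw [hcast, PySem.List.pySetD_natCast, PySem.List.pyGetD_natCast]
      refine ⟨by simp [ihlen], ?_⟩
      intro i
      rw [List.getElem?_set, ihlen]
      by_cases hij : 2*m+1 = i
      · subst hij
        by_cases hlt : 2*m+1 < parts.length
        · rw [if_pos rfl, if_pos hlt]
          have hR : ((List.range m).foldl (fun tl (k : Nat) =>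
              PySem.List.pySetD tl (1 + 2*(k:Int)) (pvRepA (PySem.List.pyGetD tl (1 + 2*(k:Int)) ""))) parts).getD (2*m+1) ""
              = parts.getD (2*m+1) "" := by
            rw [List.getD_eq_getElem?_getD, List.getD_eq_getElem?_getD, ihget]
            rw [if_neg (by omega)]
          rw [hR]
          have hsome : parts[2*m+1]? = some parts[2*m+1] := List.getElem?_eq_getElem hlt
          rw [if_pos (by omega), hsome]
          simp [List.getD_eq_getElem?_getD, hsome]
        · rw [if_pos rfl, if_neg hlt]
          have hnone : parts[2*m+1]? = none := List.getElem?_eq_none (by omega)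
          rw [if_pos (by omega), hnone]
          rfl
      · rw [if_neg hij, ihget]
        by_cases hodd : i % 2 = 1
        · by_cases hi : i < 2*m
          · rw [if_pos ⟨hodd, hi⟩, if_pos ⟨hodd, by omega⟩]
          · rw [if_neg (by omega), if_neg (by omega)]
        · rw [if_neg (by omega), if_neg (by omega)]
  set m : Nat := (if (1:Int) < (parts.length : Int) then (((parts.length : Int) - 1 + 2 - 1) / 2).toNat else 0) with hm
  obtain ⟨hlen, hget⟩ := inv m
  have hbig : ∀ i : Nat, i % 2 = 1 → i < parts.length → i < 2*m := by
    intro i hodd hi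
    by_cases h1 : (1:Int) < (parts.length : Int)
    · have : m = parts.length / 2 := by
        rw [hm, if_pos h1]
        have : ((parts.length : Int) - 1 + 2 - 1) = ((parts.length : Int)) := by ring
        rw [this]
        have h22 : ((parts.length : Int)) / 2 = ((parts.length / 2 : Nat) : Int) := by
          exact_mod_cast rfl
        rw [h22, Int.toNat_natCast]
      omega
    · exfalso; omega
  constructor
  · exact hlen
  · intro i
    rw [hget i]
    by_cases hodd : i % 2 = 1
    · by_cases hi : i < parts.length
      · rw [if_pos ⟨hodd, hbig i hodd hi⟩]
        have hsome : parts[i]? = some parts[i] := List.getElem?_eq_getElem hi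
        rw [hsome]
        simp [hodd]
      · have hnone : parts[i]? = none := List.getElem?_eq_none (by omega)
        rw [hnone]
        simp [hodd]
    · rw [if_neg (by omega)]
      cases h : parts[i]? <;> simp [hodd]

-- ===== VERDICT (by name: the statement is the Claim_ definition above) =====
theorem maskBracketInString_spec : Claim_equal_maskBracketInString := by
  intro text quote _hdom hpre
  unfold Spec_maskBracketInString maskBracketInString maskBracketInString_alt
  by_cases hc : PySem.Str.count text quote % 2 = 0
  · by_cases hq : quote = ""
    · exfalso
      apply hpre
      refine ⟨hq, ?_⟩
      subst hq
      have hcv : PySem.Str.count text "" = text.toList.length + 1 := by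
        simp [PySem.Str.count, PySem.Chars.count]
      rw [hcv] at hc
      omega
    · have hqe : quote.toList ≠ [] := by
        intro h
        exact hq (by cases quote; simp_all)
      have hsplit : PySem.Str.split? text quote
          = some ((PySem.Chars.splitOn text.toList quote.toList).map String.ofList) := by
        simp only [PySem.Str.split?, PySem.Chars.split?]
        rw [if_neg (by simp [hqe])]
        rfl
      rw [if_pos (by simp only [beq_iff_eq]; exact hc),
          if_neg (by simp only [bne_iff_ne, ne_eq, not_not]; exact hc), hsplit]
      obtain ⟨hlen, hget⟩ :=
        pvFoldl_setOdd ((PySem.Chars.splitOn text.toList quote.toList).map String.ofList)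
      rw [pvScanB_eq]
      simp only [List.reverse_nil, List.nil_append]
      rw [pvMj_eq_join quote.toList hqe (text.toList.length + 1) text.toList false (by omega)]
      simp only [PySem.Str.join]
      have hsegs : PySem.Chars.splitOn text.toList quote.toList
          = pvSegs quote.toList (text.toList.length + 1) text.toList := by
        rw [PySem.Chars.splitOn, pvSplitOn_go_eq]
        have hne := pvSegs_ne_nil quote.toList (text.toList.length + 1) text.toList
        cases h : pvSegs quote.toList (text.toList.length + 1) text.toList with
        | nil => exact absurd h hne
        | cons s ss => simp [pvConsHead]
      apply congrArg
      apply congrArg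
      apply List.ext_getElem?
      intro i
      rw [List.getElem?_map, hget i, pvMaskSegs_getElem?, ← hsegs, List.getElem?_map]
      cases h : (PySem.Chars.splitOn text.toList quote.toList)[i]? with
      | none => rfl
      | some s =>
        simp only [Option.map_some]
        by_cases hodd : i % 2 = 1
        · rw [if_pos hodd]
          simp [hodd, pvRepA_toList]
        · rw [if_neg hodd]
          simp [hodd]
  · rw [if_neg (by simp only [beq_iff_eq]; exact hc),
        if_pos (by simp only [bne_iff_ne, ne_eq]; exact hc)]

theorem maskBracketInString_raises : Claim_raises_maskBracketInString := by
  unfold Claim_raises_maskBracketInString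
  exact ⟨by intro text quote _ hr hp; exact hp hr, by decide⟩

-- self-check: the raise witness really lies inside Raises_ (keeps the raises theorem in use)
theorem maskBracketInString_raises_ok :
    Raises_maskBracketInString pvRaiseWitness_maskBracketInString.1 pvRaiseWitness_maskBracketInString.2 :=
  maskBracketInString_raises.2.2.1
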